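-- pv_equiv track=rewrite | github.com/LukeBrockley/temp | solution.py | secure
-- ===== SOURCE A (Python) =====
-- def secure(words, s):
--     w = set([word.lower() for word in words])
--     ret = s.split(' ')
--     flag = False
--
--     for i in range(len(ret)):
--         phrase = ret[i]
--         st, cur = [], ''
--
--         for x, j in enumerate(phrase):
--             if j.isalnum() or (j == "'" and cur and x != len(phrase) - 1 and phrase[x+1].isalnum()):
--                 cur += j
--             else:
--                 if cur:
--                     if cur.lower() in w:
--                         flag = True
--                         cur = '*' * len(cur)
--                     st.append(cur)
--                     cur = ''
--                 st.append(j)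
--         if cur and cur.lower() in w:
--             flag = True
--             st.append('*' * len(cur))
--         else:
--             st.append(cur)
--
--         ret[i] = ''.join(st)
--
--     return flag, ' '.join(ret)
-- ===== SOURCE B (Python) =====
-- def _tokenize(s):
--     # one pass over the WHOLE string (no split): ordered segments tagged
--     # word (True) / separator (False); a space is just another separator char
--     segs = []
--     cur = ''
--     n = len(s)
--     for x in range(n):
--         j = s[x]
--         if j.isalnum() or (j == "'" and cur and x + 1 < n and s[x + 1].isalnum()):
--             cur += j
--         else:
--             if cur:
--                 segs.append((True, cur))
--                 cur = ''
--             segs.append((False, j))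
--     if cur:
--         segs.append((True, cur))
--     return segs
--
--
-- def secure(words, s):
--     w = {word.lower() for word in words}
--     flag = False
--     parts = []
--     for kind, text in _tokenize(s):
--         if kind and text.lower() in w:
--             flag = True
--             parts.append('*' * len(text))
--         else:
--             parts.append(text)
--     return flag, ''.join(parts)
-- ===== Notes on version B (the rewrite author's own statement) =====
-- stated objective: alternative
-- what changed: B drops A's split(' ')/rejoin and fused censor-while-scanning loop: it tokenizes the whole string in one pass into tagged word/separator segments (a space is just another separator) and then censors the word segments in a second pass, concatenating all segments.
import Mathlib
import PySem

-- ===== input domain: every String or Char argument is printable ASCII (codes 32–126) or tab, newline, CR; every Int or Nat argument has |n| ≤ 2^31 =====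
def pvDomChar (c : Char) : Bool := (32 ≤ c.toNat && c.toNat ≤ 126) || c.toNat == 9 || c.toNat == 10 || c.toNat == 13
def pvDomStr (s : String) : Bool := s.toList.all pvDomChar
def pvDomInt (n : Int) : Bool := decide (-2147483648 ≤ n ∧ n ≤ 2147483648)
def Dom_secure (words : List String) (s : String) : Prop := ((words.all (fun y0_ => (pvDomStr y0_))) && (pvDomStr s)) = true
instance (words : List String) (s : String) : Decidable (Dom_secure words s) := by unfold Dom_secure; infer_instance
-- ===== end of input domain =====

-- B censors by a single whole-string tokenize-then-censor pass (no split/join, no fused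
-- censoring inside the scan); same return value, objective: alternative decomposition.

-- ===== PORT A =====
-- shared by both ports: the lowered word set and the word-character test, which both
-- Python sources spell identically
def pvLowerSet (words : List String) : PySem.Set (List Char) :=
  PySem.Set.ofList (words.map (fun t => PySem.Chars.lower t.toList))

-- lookahead 'phrase[x+1].isalnum()' (false when x is the last index)
def pvLook : List Char → Bool
  | [] => false
  | d :: _ => PySem.Chars.isalnum d

-- "j.isalnum() or (j == \"'\" and cur and <next char exists and is alnum>)"
def pvPred (cur : List Char) (c : Char) (rest : List Char) : Bool :=
  PySem.Chars.isalnum c || (c == '\'' && !cur.isEmpty && pvLook rest)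

-- A's fused inner loop over one phrase: state (cur, st, flag), censoring as it flushes
def loopA (w : PySem.Set (List Char)) :
    List Char → List Char → List (List Char) → Bool → Bool × List (List Char)
  | [], cur, st, flag =>
      if !cur.isEmpty && PySem.Set.contains w (PySem.Chars.lower cur) then
        (true, st ++ [List.replicate cur.length '*'])
      else (flag, st ++ [cur])
  | c :: rest, cur, st, flag =>
      if pvPred cur c rest then loopA w rest (cur ++ [c]) st flag
      else if !cur.isEmpty then
        (if PySem.Set.contains w (PySem.Chars.lower cur) then
          loopA w rest [] (st ++ [List.replicate cur.length '*', [c]]) true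
        else loopA w rest [] (st ++ [cur, [c]]) flag)
      else loopA w rest [] (st ++ [[c]]) flag

def secure (words : List String) (s : String) : Bool × String :=
  let w := pvLowerSet words
  let ret := PySem.Chars.splitOn s.toList [' ']
  let r := ret.foldl
    (fun (acc : Bool × List (List Char)) ph =>
      let pr := loopA w ph [] [] acc.1
      (pr.1, acc.2 ++ [PySem.Chars.join [] pr.2]))
    (false, [])
  (r.1, String.ofList (PySem.Chars.join [' '] r.2))

-- ===== PORT B =====
-- pass 1: tokenize the WHOLE string into tagged segments (true = word, false = separator)
def tokB : List Char → List Char → List (Bool × List Char) → List (Bool × List Char)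
  | [], cur, segs => segs ++ (if cur.isEmpty then [] else [(true, cur)])
  | c :: rest, cur, segs =>
      if pvPred cur c rest then tokB rest (cur ++ [c]) segs
      else tokB rest [] (segs ++ (if cur.isEmpty then [] else [(true, cur)]) ++ [(false, [c])])

-- pass 2: censor word segments, concatenate everything
def secure_alt (words : List String) (s : String) : Bool × String :=
  let w := pvLowerSet words
  let segs := tokB s.toList [] []
  let r := segs.foldl
    (fun (acc : Bool × List (List Char)) kt =>
      if kt.1 && PySem.Set.contains w (PySem.Chars.lower kt.2) then
        (true, acc.2 ++ [List.replicate kt.2.length '*'])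
      else (acc.1, acc.2 ++ [kt.2]))
    (false, [])
  (r.1, String.ofList (PySem.Chars.join [] r.2))

-- ===== PRECONDITION & SPEC =====
def Spec_secure (words : List String) (s : String) (out : Bool × String) : Prop := out = secure_alt words s
instance (words : List String) (s : String) (out : Bool × String) : Decidable (Spec_secure words s out) := by unfold Spec_secure; infer_instance

-- ===== CLAIM (what is proved, stated in full; the proofs are below) =====
def Claim_equal_secure : Prop := ∀ (words : List String) (s : String), Dom_secure words s → Spec_secure words s (secure words s)

-- ===== LEMMAS AND PROOFS =====

-- pure (non-accumulator) form of the tokenizer, for the proofs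
def tok : List Char → List Char → List (Bool × List Char)
  | [], cur => if cur.isEmpty then [] else [(true, cur)]
  | c :: rest, cur =>
      if pvPred cur c rest then tok rest (cur ++ [c])
      else (if cur.isEmpty then [] else [(true, cur)]) ++ (false, [c]) :: tok rest []

def pM (w : PySem.Set (List Char)) (kt : Bool × List Char) : Bool :=
  kt.1 && PySem.Set.contains w (PySem.Chars.lower kt.2)

def rend (w : PySem.Set (List Char)) (kt : Bool × List Char) : List Char :=
  if pM w kt then List.replicate kt.2.length '*' else kt.2

theorem joinE (l : List (List Char)) : PySem.Chars.join [] l = l.flatten := by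
  induction l with
  | nil => rfl
  | cons x t ih =>
    cases t with
    | nil => simp [PySem.Chars.join_singleton]
    | cons y u => simp only [PySem.Chars.join_cons_cons, ih, List.flatten_cons]; simp

theorem tokB_eq (cs : List Char) : ∀ cur segs, tokB cs cur segs = segs ++ tok cs cur := by
  induction cs with
  | nil => intro cur segs; rfl
  | cons c rest ih =>
    intro cur segs
    simp only [tokB, tok]
    by_cases h : pvPred cur c rest = true
    · simp [h, ih]
    · simp only [Bool.not_eq_true] at h
      simp [h, ih, List.append_assoc]

theorem censor_fold (w : PySem.Set (List Char)) (segs : List (Bool × List Char)) :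
    ∀ flag parts,
      segs.foldl
        (fun (acc : Bool × List (List Char)) kt =>
          if kt.1 && PySem.Set.contains w (PySem.Chars.lower kt.2) then
            (true, acc.2 ++ [List.replicate kt.2.length '*'])
          else (acc.1, acc.2 ++ [kt.2]))
        (flag, parts)
      = (flag || segs.any (pM w), parts ++ segs.map (rend w)) := by
  induction segs with
  | nil => intro flag parts; simp
  | cons kt rest ih =>
    intro flag parts
    have hr : rend w kt = if pM w kt then List.replicate kt.2.length '*' else kt.2 := rfl
    rw [List.foldl_cons]
    cases h : pM w kt with
    | true =>
      have hb : (kt.1 && PySem.Set.contains w (PySem.Chars.lower kt.2)) = true := h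
      rw [if_pos hb, ih]
      simp [List.any_cons, hr, h, List.append_assoc]
    | false =>
      have hb : ¬ ((kt.1 && PySem.Set.contains w (PySem.Chars.lower kt.2)) = true) := by
        intro hc; rw [show (kt.1 && PySem.Set.contains w (PySem.Chars.lower kt.2)) = pM w kt from rfl, h] at hc; exact absurd hc (by simp)
      rw [if_neg hb, ih]
      simp [List.any_cons, hr, h, List.append_assoc]

-- the fused censoring scan of A = tokenize, then censor (join-level, since A may append '')
theorem loopA_eq (w : PySem.Set (List Char)) (cs : List Char) :
    ∀ cur st flag,
      (loopA w cs cur st flag).1 = (flag || (tok cs cur).any (pM w)) ∧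
      (loopA w cs cur st flag).2.flatten = st.flatten ++ ((tok cs cur).map (rend w)).flatten := by
  induction cs with
  | nil =>
    intro cur st flag
    simp only [loopA, tok]
    by_cases hc : cur.isEmpty = true
    · have : cur = [] := by simpa using hc
      subst this
      simp
    · have hc' : cur.isEmpty = false := by simpa using hc
      by_cases hm : PySem.Chars.lower cur ∈ w
      · simp [hc', hm, pM, rend]
      · simp [hc', hm, pM, rend]
  | cons c rest ih =>
    intro cur st flag
    simp only [loopA, tok]
    by_cases hp : pvPred cur c rest = true
    · simp [hp, ih]
    · simp only [Bool.not_eq_true] at hp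
      by_cases hc : cur.isEmpty = true
      · have : cur = [] := by simpa using hc
        subst this
        simp [hp, ih, pM, rend]
      · have hc' : cur.isEmpty = false := by simpa using hc
        by_cases hm : PySem.Chars.lower cur ∈ w
        · simp [hp, hc', hm, ih, pM, rend, List.append_assoc]
        · simp [hp, hc', hm, ih, pM, rend, List.append_assoc]

theorem pvLook_append_space (p rest : List Char) :
    pvLook (p ++ ' ' :: rest) = pvLook p := by
  cases p with
  | nil => simp [pvLook]; decide
  | cons d _ => rfl

theorem pvPred_space (cur : List Char) (r : List Char) : pvPred cur ' ' r = false := by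
  simp [pvPred]; decide

-- the tokenizer never carries a word across a space: it splits there
theorem tok_split (p : List Char) :
    ∀ cur rest, ' ' ∉ p →
      tok (p ++ ' ' :: rest) cur = tok p cur ++ (false, [' ']) :: tok rest [] := by
  induction p with
  | nil =>
    intro cur rest _
    simp only [List.nil_append, tok, pvPred_space, Bool.false_eq_true, if_false]
  | cons c p' ih =>
    intro cur rest hmem
    have hc : c ≠ ' ' := fun h => hmem (h ▸ List.mem_cons_self)
    have hp' : ' ' ∉ p' := fun h => hmem (List.mem_cons_of_mem _ h)
    simp only [List.cons_append, tok]
    have hpr : pvPred cur c (p' ++ ' ' :: rest) = pvPred cur c p' := by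
      simp [pvPred, pvLook_append_space]
    rw [hpr]
    by_cases hp : pvPred cur c p' = true
    · simp [hp, ih _ _ hp']
    · simp only [Bool.not_eq_true] at hp
      simp [hp, ih _ _ hp', List.append_assoc]

-- ---- characterization of PySem.Chars.splitOn with a one-char separator ----
def mySplit : List Char → List Char → List (List Char) → List (List Char)
  | [], cur, acc => (cur.reverse :: acc).reverse
  | c :: rest, cur, acc =>
      if c = ' ' then mySplit rest [] (cur.reverse :: acc) else mySplit rest (c :: cur) acc

theorem go_eq (fuel : Nat) : ∀ l cur acc, l.length ≤ fuel →
    PySem.Chars.splitOn.go [' '] fuel l cur acc = mySplit l cur acc := by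
  induction fuel with
  | zero =>
    intro l cur acc hl
    have : l = [] := List.length_eq_zero_iff.mp (Nat.le_zero.mp hl)
    subst this
    simp [PySem.Chars.splitOn.go, mySplit]
  | succ n ih =>
    intro l cur acc hl
    cases l with
    | nil => simp [PySem.Chars.splitOn.go, mySplit]
    | cons c rest =>
      simp only [PySem.Chars.splitOn.go, mySplit]
      by_cases hc : c = ' '
      · subst hc
        have hpre : List.isPrefixOf [' '] (' ' :: rest) = true := by
          simp [List.isPrefixOf]
        simp only [hpre, if_true, List.length_cons, List.drop_succ_cons, if_true]
        exact ih _ _ _ (by simpa using Nat.le_of_succ_le_succ hl)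
      · have hpre : List.isPrefixOf [' '] (c :: rest) = false := by
          simp [List.isPrefixOf, BEq.beq]
          exact fun h => hc h.symm
        simp only [hpre, Bool.false_eq_true, if_false, hc]
        exact ih _ _ _ (by simpa using Nat.le_of_succ_le_succ hl)

theorem mySplit_acc (l : List Char) : ∀ cur acc,
    mySplit l cur acc = acc.reverse ++ mySplit l cur [] := by
  induction l with
  | nil => intro cur acc; simp [mySplit]
  | cons c rest ih =>
    intro cur acc
    by_cases hc : c = ' '
    · subst hc
      simp only [mySplit, if_true]
      rw [ih [] (cur.reverse :: acc), ih [] [cur.reverse]]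
      simp
    · simp only [mySplit, if_neg hc]
      exact ih _ _

theorem splitOn_eq (cs : List Char) : PySem.Chars.splitOn cs [' '] = mySplit cs [] [] := by
  unfold PySem.Chars.splitOn
  exact go_eq _ _ _ _ (Nat.le_succ _)

theorem mySplit_no_space (p : List Char) : ∀ cur, ' ' ∉ p →
    mySplit p cur [] = [cur.reverse ++ p] := by
  induction p with
  | nil => intro cur _; simp [mySplit]
  | cons c p' ih =>
    intro cur hmem
    have hc : c ≠ ' ' := fun h => hmem (h ▸ List.mem_cons_self)
    simp only [mySplit, if_neg hc]
    rw [ih _ (fun h => hmem (List.mem_cons_of_mem _ h))]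
    simp

theorem splitOn_no_space (p : List Char) (h : ' ' ∉ p) :
    PySem.Chars.splitOn p [' '] = [p] := by
  rw [splitOn_eq, mySplit_no_space _ _ h]; simp

theorem splitOn_split (p rest : List Char) (h : ' ' ∉ p) :
    PySem.Chars.splitOn (p ++ ' ' :: rest) [' '] = p :: PySem.Chars.splitOn rest [' '] := by
  rw [splitOn_eq, splitOn_eq]
  have key : ∀ (q : List Char) (cur : List Char), ' ' ∉ q →
      mySplit (q ++ ' ' :: rest) cur [] = (cur.reverse ++ q) :: mySplit rest [] [] := by
    intro q
    induction q with
    | nil =>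
      intro cur _
      simp only [List.nil_append, mySplit, if_true]
      rw [mySplit_acc]
      simp
    | cons c q' ih =>
      intro cur hmem
      have hc : c ≠ ' ' := fun h => hmem (h ▸ List.mem_cons_self)
      simp only [List.cons_append, mySplit, if_neg hc]
      rw [ih _ (fun h => hmem (List.mem_cons_of_mem _ h))]
      simp
  rw [key p [] h]; simp

theorem mySplit_ne_nil (l : List Char) : ∀ cur, mySplit l cur [] ≠ [] := by
  induction l with
  | nil => intro cur; simp [mySplit]
  | cons c rest ih =>
    intro cur
    by_cases hc : c = ' '
    · subst hc
      simp only [mySplit, if_true]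
      rw [mySplit_acc]
      simp
    · simp only [mySplit, if_neg hc]
      exact ih _

theorem splitOn_ne_nil (cs : List Char) : PySem.Chars.splitOn cs [' '] ≠ [] := by
  rw [splitOn_eq]; exact mySplit_ne_nil _ _

-- ---- outer structure ----
theorem outer_fold (w : PySem.Set (List Char)) (phs : List (List Char)) :
    ∀ flag pieces,
      phs.foldl
        (fun (acc : Bool × List (List Char)) ph =>
          let pr := loopA w ph [] [] acc.1
          (pr.1, acc.2 ++ [PySem.Chars.join [] pr.2]))
        (flag, pieces)
      = (flag || phs.any (fun ph => (tok ph []).any (pM w)),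
         pieces ++ phs.map (fun ph => ((tok ph []).map (rend w)).flatten)) := by
  induction phs with
  | nil => intro flag pieces; simp
  | cons ph rest ih =>
    intro flag pieces
    simp only [List.foldl_cons, List.any_cons, List.map_cons]
    have h1 := (loopA_eq w ph [] [] flag).1
    have h2 := (loopA_eq w ph [] [] flag).2
    simp only [List.flatten_nil, List.nil_append] at h1 h2
    rw [joinE, h2, h1, ih]
    simp [Bool.or_assoc, List.append_assoc]

theorem exists_first_space (cs : List Char) (h : ' ' ∈ cs) :
    ∃ p rest, cs = p ++ ' ' :: rest ∧ ' ' ∉ p ∧ rest.length < cs.length := by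
  induction cs with
  | nil => cases h
  | cons c t ih =>
    by_cases hc : c = ' '
    · exact ⟨[], t, by simp [hc], by simp, by simp⟩
    · have ht : ' ' ∈ t := by
        rcases List.mem_cons.mp h with h1 | h1
        · exact absurd h1.symm hc
        · exact h1
      obtain ⟨p, rest, he, hn, hl⟩ := ih ht
      refine ⟨c :: p, rest, by simp [he], ?_, by simp; omega⟩
      intro hmem
      rcases List.mem_cons.mp hmem with h1 | h1
      · exact hc h1.symm
      · exact hn h1

theorem bridge (w : PySem.Set (List Char)) (cs : List Char) :
    PySem.Chars.join [' ']
        ((PySem.Chars.splitOn cs [' ']).map (fun ph => ((tok ph []).map (rend w)).flatten))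
      = ((tok cs []).map (rend w)).flatten ∧
    (PySem.Chars.splitOn cs [' ']).any (fun ph => (tok ph []).any (pM w))
      = (tok cs []).any (pM w) := by
  by_cases h : ' ' ∈ cs
  · obtain ⟨p, rest, hcs, hpns, hlen⟩ := exists_first_space cs h
    obtain ⟨ih1, ih2⟩ := bridge w rest
    rw [hcs, splitOn_split _ _ hpns, tok_split _ _ _ hpns]
    obtain ⟨y, t, hyt⟩ : ∃ y t, PySem.Chars.splitOn rest [' '] = y :: t := by
      cases hsp : PySem.Chars.splitOn rest [' '] with
      | nil => exact absurd hsp (splitOn_ne_nil _)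
      | cons y t => exact ⟨y, t, rfl⟩
    constructor
    · rw [hyt] at ih1 ⊢
      rw [List.map_cons] at ih1
      simp only [List.map_cons, PySem.Chars.join_cons_cons]
      rw [ih1]
      simp [rend, pM, List.append_assoc]
    · rw [hyt] at ih2 ⊢
      simp only [List.any_cons] at ih2 ⊢
      simp [List.any_append, ← ih2, pM]
  · rw [splitOn_no_space _ h]
    simp [PySem.Chars.join_singleton]
termination_by cs.length
decreasing_by simpa [hcs] using hlen

-- ===== VERDICT (by name: the statement is the Claim_ definition above) =====
theorem secure_spec : Claim_equal_secure := by
  intro words s _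
  unfold Spec_secure secure secure_alt
  rw [tokB_eq]
  simp only [List.nil_append]
  rw [censor_fold (pvLowerSet words) (tok s.toList []) false []]
  rw [outer_fold (pvLowerSet words) (PySem.Chars.splitOn s.toList [' ']) false []]
  simp only [Bool.false_or, List.nil_append]
  obtain ⟨h1, h2⟩ := bridge (pvLowerSet words) s.toList
  rw [h1, h2, joinE]
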